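-- pv_equiv track=rewrite | github.com/ndl1n/Loan_MoE_System | conversation/utils.py | validate_tw_id
-- ===== SOURCE A (Python) =====
-- def validate_tw_id(id_str: str) -> bool:
--     """
--     驗證台灣身分證字號 (含檢查碼驗證)
--
--     格式: 1個英文字母 + 9個數字
--     檢查碼演算法: 內政部標準
--     """
--     if not id_str or len(id_str) != 10:
--         return False
--
--     id_str = id_str.upper()
--
--     # 檢查格式
--     if not (id_str[0].isalpha() and id_str[1:].isdigit()):
--         return False
--
--     # 英文字母對應數字表
--     letter_map = {
--         'A': 10, 'B': 11, 'C': 12, 'D': 13, 'E': 14, 'F': 15, 'G': 16,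
--         'H': 17, 'I': 34, 'J': 18, 'K': 19, 'L': 20, 'M': 21, 'N': 22,
--         'O': 35, 'P': 23, 'Q': 24, 'R': 25, 'S': 26, 'T': 27, 'U': 28,
--         'V': 29, 'W': 32, 'X': 30, 'Y': 31, 'Z': 33
--     }
--
--     first_letter = id_str[0]
--     if first_letter not in letter_map:
--         return False
--
--     # 轉換英文字母為數字
--     letter_num = letter_map[first_letter]
--     d1 = letter_num // 10
--     d2 = letter_num % 10
--
--     # 計算檢查碼
--     weights = [1, 9, 8, 7, 6, 5, 4, 3, 2, 1, 1]
--     digits = [d1, d2] + [int(d) for d in id_str[1:]]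
--
--     total = sum(d * w for d, w in zip(digits, weights))
--
--     # 檢查碼驗證
--     return total % 10 == 0
-- ===== SOURCE B (Python) =====
-- # Double-accumulator checksum: the decreasing weights 9..1 are realised as a sum of
-- # running prefix sums, so no weight list and no multiplications are needed.
-- LETTER_VALUES = (10, 11, 12, 13, 14, 15, 16, 17, 34, 18, 19, 20, 21, 22, 35, 23,
--                  24, 25, 26, 27, 28, 29, 32, 30, 31, 33)
--
--
-- def validate_tw_id(id_str: str) -> bool:
--     if len(id_str) != 10:
--         return False
--     s = id_str.upper()
--     if not (s[0].isalpha() and s[1:].isdigit()):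
--         return False
--     k = ord(s[0]) - ord('A')
--     if not 0 <= k < 26:
--         return False
--     n = LETTER_VALUES[k]
--     acc = n % 10      # running prefix sum over [d2, b1..b8]
--     total = n // 10   # collects d1 and each prefix sum (= the weighted terms)
--     for c in s[1:9]:
--         total += acc
--         acc += int(c)
--     total += acc + int(s[9])
--     return total % 10 == 0
-- ===== Notes on version B (the rewrite author's own statement) =====
-- stated objective: alternative
-- what changed: B replaces the weight list and multiply-accumulate sum by a double-accumulator pass (the decreasing weights 9..1 are realised as a sum of running prefix sums, so the loop does only additions), and replaces the letter dictionary by a tuple indexed with the letter's ordinal minus 65.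
import Mathlib
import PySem

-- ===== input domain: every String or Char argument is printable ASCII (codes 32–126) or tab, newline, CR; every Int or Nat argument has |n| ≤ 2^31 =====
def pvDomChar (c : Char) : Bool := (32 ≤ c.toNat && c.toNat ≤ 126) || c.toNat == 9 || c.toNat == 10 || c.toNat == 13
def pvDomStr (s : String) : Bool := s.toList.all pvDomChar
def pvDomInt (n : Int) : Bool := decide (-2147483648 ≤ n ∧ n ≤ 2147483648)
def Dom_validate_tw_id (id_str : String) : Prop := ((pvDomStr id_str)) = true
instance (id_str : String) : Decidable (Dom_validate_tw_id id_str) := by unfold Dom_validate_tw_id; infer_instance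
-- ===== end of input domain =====

-- B replaces A's weight list and multiply-accumulate checksum by a double-accumulator pass
-- (the decreasing weights are realised as a sum of running prefix sums, additions only) and
-- A's letter dictionary by a tuple indexed with the letter's ordinal minus 65 (objective: alternative).

-- int(c) for a single character, as both Pythons do inside their digit guards
def pyIntChar (c : Char) : Int := (PySem.Int.ofChars? [c]).getD 0

-- ===== PORT A =====
def letterMapA : PySem.Dict Char Int :=
  PySem.Dict.ofList [('A', 10), ('B', 11), ('C', 12), ('D', 13), ('E', 14), ('F', 15), ('G', 16),
    ('H', 17), ('I', 34), ('J', 18), ('K', 19), ('L', 20), ('M', 21), ('N', 22),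
    ('O', 35), ('P', 23), ('Q', 24), ('R', 25), ('S', 26), ('T', 27), ('U', 28),
    ('V', 29), ('W', 32), ('X', 30), ('Y', 31), ('Z', 33)]

def validate_tw_id (id_str : String) : Bool :=
  let cs := id_str.toList
  if cs.isEmpty || !(cs.length == 10) then false
  else
    let u := PySem.Chars.upper cs
    if !(PySem.Chars.isalpha (PySem.List.pyGetD u 0 ' ')
          && PySem.Chars.strIsdigit (PySem.List.slice u (some 1) none)) then false
    else
      let first_letter := PySem.List.pyGetD u 0 ' '
      if !(letterMapA.contains first_letter) then false
      else
        let letter_num := letterMapA.getD first_letter 0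
        let d1 := PySem.Int.floordiv letter_num 10
        let d2 := PySem.Int.mod letter_num 10
        let weights : List Int := [1, 9, 8, 7, 6, 5, 4, 3, 2, 1, 1]
        let digits := [d1, d2] ++ (PySem.List.slice u (some 1) none).map pyIntChar
        let total := ((digits.zip weights).map (fun p => p.1 * p.2)).sum
        PySem.Int.mod total 10 == 0

-- ===== PORT B =====
def letterValuesB : List Int :=
  [10, 11, 12, 13, 14, 15, 16, 17, 34, 18, 19, 20, 21, 22, 35, 23,
   24, 25, 26, 27, 28, 29, 32, 30, 31, 33]

def validate_tw_id_alt (id_str : String) : Bool :=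
  let cs := id_str.toList
  if !(cs.length == 10) then false
  else
    let s := PySem.Chars.upper cs
    if !(PySem.Chars.isalpha (PySem.List.pyGetD s 0 ' ')
          && PySem.Chars.strIsdigit (PySem.List.slice s (some 1) none)) then false
    else
      let k : Int := ((PySem.List.pyGetD s 0 ' ').toNat : Int) - 65
      if !(decide (0 ≤ k) && decide (k < 26)) then false
      else
        let n := PySem.List.pyGetD letterValuesB k 0
        -- for c in s[1:9]: total += acc; acc += int(c)
        let st := (PySem.List.slice s (some 1) (some 9)).foldl
          (fun (p : Int × Int) c => (p.1 + p.2, p.2 + pyIntChar c))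
          (PySem.Int.floordiv n 10, PySem.Int.mod n 10)
        PySem.Int.mod (st.1 + st.2 + pyIntChar (PySem.List.pyGetD s 9 ' ')) 10 == 0

-- ===== PRECONDITION & SPEC =====
def Spec_validate_tw_id (id_str : String) (out : Bool) : Prop := out = validate_tw_id_alt id_str
instance (id_str : String) (out : Bool) : Decidable (Spec_validate_tw_id id_str out) := by unfold Spec_validate_tw_id; infer_instance

-- ===== CLAIM (what is proved, stated in full; the proofs are below) =====
def Claim_equal_validate_tw_id : Prop := ∀ (id_str : String), Dom_validate_tw_id id_str → Spec_validate_tw_id id_str (validate_tw_id id_str)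

-- ===== LEMMAS AND PROOFS =====

theorem charOfNat_toNat (n : Nat) (h1 : 65 ≤ n) (h2 : n ≤ 90) : (Char.ofNat n).toNat = n := by
  interval_cases n <;> decide

theorem char_le_iff (a c : Char) : (a ≤ c) ↔ a.toNat ≤ c.toNat := by
  rw [Char.le_def]
  show a.val ≤ c.val ↔ a.val.toNat ≤ c.val.toNat
  exact UInt32.le_iff_toNat_le

theorem upper_alpha_range (c : Char)
    (h : PySem.Chars.isalpha (PySem.Chars.upperChar c) = true) :
    65 ≤ (PySem.Chars.upperChar c).toNat ∧ (PySem.Chars.upperChar c).toNat ≤ 90 := by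
  have ha : ('a').toNat = 97 := by decide
  have hz : ('z').toNat = 122 := by decide
  have hA : ('A').toNat = 65 := by decide
  have hZ : ('Z').toNat = 90 := by decide
  unfold PySem.Chars.isalpha PySem.Chars.isupper PySem.Chars.islower at h
  unfold PySem.Chars.upperChar PySem.Chars.islower at *
  by_cases hl : ('a' ≤ c && c ≤ 'z') = true
  · simp only [hl, if_true] at h ⊢
    simp only [Bool.and_eq_true, decide_eq_true_eq, char_le_iff, ha, hz] at hl
    rw [charOfNat_toNat] <;> omega
  · simp only [Bool.not_eq_true] at hl
    simp only [hl, Bool.false_eq_true, if_false] at h ⊢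
    simp only [Bool.or_eq_true, Bool.and_eq_true, decide_eq_true_eq,
      char_le_iff, hA, hZ, Bool.false_eq_true, or_false] at h
    simp only [Bool.and_eq_false_iff, decide_eq_false_iff_not, char_le_iff, not_le,
      ha, hz] at hl
    omega

theorem letter_facts (c : Char) (h1 : 65 ≤ c.toNat) (h2 : c.toNat ≤ 90) :
    letterMapA.contains c = true ∧
    PySem.List.pyGetD letterValuesB ((c.toNat : Int) - 65) 0 = letterMapA.getD c 0 := by
  have hc : c = Char.ofNat c.toNat := (Char.ofNat_toNat c).symm
  rw [hc]
  generalize c.toNat = n at h1 h2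
  interval_cases n <;> exact ⟨by decide, by decide⟩

theorem digit_facts (c : Char) (h : PySem.Chars.isdigit c = true) :
    pyIntChar c = (c.toNat : Int) - 48 ∧ 48 ≤ c.toNat ∧ c.toNat ≤ 57 := by
  unfold PySem.Chars.isdigit at h
  simp only [Bool.and_eq_true, decide_eq_true_eq] at h
  have h1 : 48 ≤ c.toNat := by
    have := h.1; rw [char_le_iff] at this; simpa using this
  have h2 : c.toNat ≤ 57 := by
    have := h.2; rw [char_le_iff] at this; simpa using this
  refine ⟨?_, h1, h2⟩
  have hc : c = Char.ofNat c.toNat := (Char.ofNat_toNat c).symm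
  rw [hc]
  generalize c.toNat = n at h1 h2
  interval_cases n <;> decide

-- ===== VERDICT (by name: the statement is the Claim_ definition above) =====
theorem validate_tw_id_spec : Claim_equal_validate_tw_id := by
  intro id_str _
  unfold Spec_validate_tw_id
  simp only [validate_tw_id, validate_tw_id_alt]
  generalize id_str.toList = cs
  rcases cs with _ | ⟨a0, _ | ⟨a1, _ | ⟨a2, _ | ⟨a3, _ | ⟨a4, _ | ⟨a5,
    _ | ⟨a6, _ | ⟨a7, _ | ⟨a8, _ | ⟨a9, _ | ⟨a10, t⟩⟩⟩⟩⟩⟩⟩⟩⟩⟩⟩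
  case cons.cons.cons.cons.cons.cons.cons.cons.cons.cons.cons =>
    simp only [List.length_cons]
    have h10 : (t.length + 1 + 1 + 1 + 1 + 1 + 1 + 1 + 1 + 1 + 1 + 1 == 10) = false := by
      simp only [beq_eq_false_iff_ne, ne_eq]
      omega
    simp [h10]
  case cons.cons.cons.cons.cons.cons.cons.cons.cons.cons =>
    -- the length-10 case
    simp only [List.isEmpty_cons, List.length_cons, List.length_nil, PySem.Chars.upper,
      List.map_cons, List.map_nil, PySem.List.slice_from_one, List.tail_cons,
      PySem.List.pyGetD_zero_cons, Bool.false_or]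
    norm_num
    by_cases hd : PySem.Chars.strIsdigit
        [PySem.Chars.upperChar a1, PySem.Chars.upperChar a2, PySem.Chars.upperChar a3,
         PySem.Chars.upperChar a4, PySem.Chars.upperChar a5, PySem.Chars.upperChar a6,
         PySem.Chars.upperChar a7, PySem.Chars.upperChar a8, PySem.Chars.upperChar a9] = true
    swap
    · rw [Bool.not_eq_true] at hd
      simp [hd]
    by_cases halpha : PySem.Chars.isalpha (PySem.Chars.upperChar a0) = true
    swap
    · rw [Bool.not_eq_true] at halpha
      simp [hd, halpha]
    obtain ⟨hr1, hr2⟩ := upper_alpha_range a0 halpha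
    obtain ⟨hcont, hval⟩ := letter_facts _ hr1 hr2
    simp only [hd, halpha, hcont, hval, Bool.and_true, Bool.true_and]
    have hslice : ∀ (x0 x1 x2 x3 x4 x5 x6 x7 x8 x9 : Char), PySem.List.slice
        [x0, x1, x2, x3, x4, x5, x6, x7, x8, x9] (some 1) (some 9) =
        [x1, x2, x3, x4, x5, x6, x7, x8] := by
      intro x0 x1 x2 x3 x4 x5 x6 x7 x8 x9
      rfl
    have hget9 : ∀ (x0 x1 x2 x3 x4 x5 x6 x7 x8 x9 : Char),
        PySem.List.pyGetD [x0, x1, x2, x3, x4, x5, x6, x7, x8, x9] 9 ' ' = x9 := by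
      intro x0 x1 x2 x3 x4 x5 x6 x7 x8 x9
      rfl
    simp only [PySem.Chars.strIsdigit, List.isEmpty_cons, List.all_cons, List.all_nil,
      Bool.not_false, Bool.true_and, Bool.and_true, Bool.and_eq_true] at hd
    obtain ⟨q1, q2, q3, q4, q5, q6, q7, q8, q9⟩ := hd
    obtain ⟨e1, l1, u1⟩ := digit_facts _ q1
    obtain ⟨e2, l2, u2⟩ := digit_facts _ q2
    obtain ⟨e3, l3, u3⟩ := digit_facts _ q3
    obtain ⟨e4, l4, u4⟩ := digit_facts _ q4
    obtain ⟨e5, l5, u5⟩ := digit_facts _ q5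
    obtain ⟨e6, l6, u6⟩ := digit_facts _ q6
    obtain ⟨e7, l7, u7⟩ := digit_facts _ q7
    obtain ⟨e8, l8, u8⟩ := digit_facts _ q8
    obtain ⟨e9, l9, u9⟩ := digit_facts _ q9
    simp only [hslice, hget9, List.foldl_cons, List.foldl_nil]
    simp only [e1, e2, e3, e4, e5, e6, e7, e8, e9]
    have hg1 : (decide ((PySem.Chars.upperChar a0).toNat < 65)) = false := by
      simp only [decide_eq_false_iff_not, not_lt]; omega
    have hg2 : (decide ((26:Int) ≤ ((PySem.Chars.upperChar a0).toNat : Int) - 65)) = false := by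
      simp only [decide_eq_false_iff_not, not_le]; omega
    simp only [hg1, hg2, Bool.not_false, Bool.true_and]
    rw [Bool.eq_iff_iff]
    simp only [beq_iff_eq]
    omega
  all_goals simp
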